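-- pv_equiv track=rewrite | github.com/GioTro/Competative_Programming_Solutions | Kattis/Python/pokerhand.py | solve
-- ===== SOURCE A (Python) =====
-- def solve(n):
-- 	max = 0
-- 	for i in range(len(n)):
-- 		c = n[i][0]
-- 		hold = 0
-- 		for j in range(len(n)):
-- 			if c == n[j][0]:
-- 				hold += 1
-- 		if hold > max:
-- 			max = hold
-- 	return max
-- ===== SOURCE B (Python) =====
-- def solve(n):
--     counts = {}
--     for s in n:
--         c = s[0]
--         counts[c] = counts.get(c, 0) + 1
--     return max(counts.values(), default=0)
-- ===== Notes on version B (the rewrite author's own statement) =====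
-- stated objective: faster
-- what changed: Replaces the nested quadratic rescan (for each element, re-count its first character over the whole list) with a single pass building a first-character frequency dict, returning the max of its counts.
import Mathlib
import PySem

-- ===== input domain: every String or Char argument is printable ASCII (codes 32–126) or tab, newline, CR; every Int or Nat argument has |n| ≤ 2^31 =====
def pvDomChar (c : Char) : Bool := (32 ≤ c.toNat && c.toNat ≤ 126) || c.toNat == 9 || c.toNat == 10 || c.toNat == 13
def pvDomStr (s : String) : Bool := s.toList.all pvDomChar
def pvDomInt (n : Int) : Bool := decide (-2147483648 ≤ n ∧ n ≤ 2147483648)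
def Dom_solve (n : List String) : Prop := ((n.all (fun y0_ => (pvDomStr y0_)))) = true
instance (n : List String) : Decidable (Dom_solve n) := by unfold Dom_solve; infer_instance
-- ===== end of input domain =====

-- B replaces A's quadratic nested rescan with one pass building a first-character
-- frequency dict and returning the max of its counts (objective: faster).

-- ===== PORT A =====
-- s[0]; exact on Pre_ (every string nonempty) — Python raises IndexError on ""
def firstChar (s : String) : Char := (PySem.Str.pyGet? s 0).getD ' '

def solve (n : List String) : Int :=
  List.foldl
    (fun m i =>
      let c := firstChar (PySem.List.pyGetD n i "")
      let hold := List.foldl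
        (fun h j => if c = firstChar (PySem.List.pyGetD n j "") then h + 1 else h)
        0 (PySem.List.pyRange 0 (n.length : Int))
      if hold > m then hold else m)
    0 (PySem.List.pyRange 0 (n.length : Int))

-- ===== PORT B =====
def solve_alt (n : List String) : Int :=
  let counts : PySem.Dict Char Int :=
    List.foldl (fun d s => d.insert (firstChar s) (d.getD (firstChar s) 0 + 1))
      PySem.Dict.empty n
  PySem.List.maxD counts.values (fun v => v) 0

-- ===== PRECONDITION & SPEC =====
-- Pre_ excludes lists containing an empty string, on which both Pythons raise IndexError (s[0]).
def Pre_solve (n : List String) : Prop := ∀ s ∈ n, s ≠ ""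
instance (n : List String) : Decidable (Pre_solve n) := by unfold Pre_solve; infer_instance

def pvWitness_solve : List String := ["ab", "ac", "b", "ad"]

def Spec_solve (n : List String) (out : Int) : Prop := out = solve_alt n
instance (n : List String) (out : Int) : Decidable (Spec_solve n out) := by unfold Spec_solve; infer_instance

-- ===== CLAIM (what is proved, stated in full; the proofs are below) =====
def Claim_equal_solve : Prop := ∀ (n : List String), Dom_solve n → Pre_solve n → Spec_solve n (solve n)

-- ===== LEMMAS AND PROOFS =====

-- fold of max is determined by the membership set of the list (same base)
lemma foldl_max_le_of_sub (l₁ l₂ : List Int) (a : Int) (h : ∀ x ∈ l₁, x ∈ l₂) :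
    l₁.foldl max a ≤ l₂.foldl max a := by
  rcases PySem.List.foldl_max_mem l₁ a with hm | hm
  · rw [hm]; exact (PySem.List.le_foldl_max l₂ a).1
  · exact (PySem.List.le_foldl_max l₂ a).2 _ (h _ hm)

lemma foldl_max_eq_of_memIff (l₁ l₂ : List Int) (a : Int) (h : ∀ x, x ∈ l₁ ↔ x ∈ l₂) :
    l₁.foldl max a = l₂.foldl max a :=
  le_antisymm (foldl_max_le_of_sub _ _ _ fun x hx => (h x).1 hx)
    (foldl_max_le_of_sub _ _ _ fun x hx => (h x).2 hx)

-- A's result as a running max of counts over the first-character list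
lemma solve_eq_foldl_max (n : List String) :
    solve n = ((n.map firstChar).map
        (fun c => ((n.map firstChar).count c : Int))).foldl max 0 := by
  unfold solve
  rw [PySem.List.foldl_pyRange_zero_pyGetD' n ""
      (f := fun m s =>
        let c := firstChar s
        let hold := List.foldl
          (fun h j => if c = firstChar (PySem.List.pyGetD n j "") then h + 1 else h)
          0 (PySem.List.pyRange 0 (n.length : Int))
        if hold > m then hold else m)]
  simp only []
  have hinner : ∀ (c : Char),
      List.foldl (fun h j => if c = firstChar (PySem.List.pyGetD n j "") then h + 1 else h)
        0 (PySem.List.pyRange 0 (n.length : Int))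
      = ((n.map firstChar).count c : Int) := by
    intro c
    rw [PySem.List.foldl_pyRange_zero_pyGetD' n ""
        (f := fun h t => if c = firstChar t then h + 1 else h)]
    rw [PySem.List.foldl_ite_add_one (fun t => c = firstChar t) n 0]
    rw [zero_add, List.count_eq_countP, List.countP_map]
    congr 1
    exact List.countP_congr (fun t _ => by simp [Function.comp, beq_eq_decide, eq_comm])
  have hstep : ∀ (m : Int) (s : String),
      (let c := firstChar s
       let hold := List.foldl
         (fun h j => if c = firstChar (PySem.List.pyGetD n j "") then h + 1 else h)
         0 (PySem.List.pyRange 0 (n.length : Int))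
       if hold > m then hold else m)
      = max m (((n.map firstChar).count (firstChar s) : Int)) := by
    intro m s
    simp only [hinner]
    by_cases h : (((n.map firstChar).count (firstChar s) : Int)) ≤ m
    · rw [if_neg (by omega), max_eq_left h]
    · rw [if_pos (by omega), max_eq_right (by omega)]
  calc List.foldl _ 0 n
      = List.foldl (fun m s => max m (((n.map firstChar).count (firstChar s) : Int))) 0 n := by
        exact PySem.List.foldl_congr_mem n _ _ 0 (fun m s _ => hstep m s)
    _ = _ := by rw [List.map_map, ← List.foldl_map]; simp only [Function.comp_def]

-- B's result: the dict is Counter(firsts), its values are the counts of the distinct firsts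
lemma solve_alt_eq (n : List String) :
    solve_alt n = PySem.List.maxD
      ((PySem.Set.ofList (n.map firstChar)).map
        (fun c => ((n.map firstChar).count c : Int)))
      (fun v => v) 0 := by
  unfold solve_alt
  have hc : List.foldl (fun d s => d.insert (firstChar s) (d.getD (firstChar s) 0 + 1))
      PySem.Dict.empty n = PySem.Dict.counter (n.map firstChar) := by
    rw [← PySem.Dict.foldl_insert_getD_add_one_eq_counter, List.foldl_map]
  simp only [hc]
  have hv : (PySem.Dict.counter (n.map firstChar)).values
      = (PySem.Set.ofList (n.map firstChar)).map
          (fun c => ((n.map firstChar).count c : Int)) := by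
    show ((PySem.Dict.counter (n.map firstChar)).items.map Prod.snd) = _
    rw [PySem.Dict.items_counter, List.map_map]
    simp [Function.comp]
  rw [hv]

-- ===== VERDICT (by name: the statement is the Claim_ definition above) =====
theorem solve_spec : Claim_equal_solve := by
  intro n _ _
  unfold Spec_solve
  rw [solve_eq_foldl_max, solve_alt_eq]
  set firsts := n.map firstChar with hf
  set K : Char → Int := fun c => ((firsts.count c) : Int) with hK
  rcases hvals : (PySem.Set.ofList firsts).map K with _ | ⟨v, t⟩
  · -- distinct-first list empty ⇒ firsts empty ⇒ both sides 0
    have hnil : firsts = [] := by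
      rcases firsts with _ | ⟨c, rest⟩
      · rfl
      · exfalso
        have : c ∈ PySem.Set.ofList (c :: rest) := (PySem.Set.mem_ofList _ _).2 (by simp)
        have : K c ∈ (PySem.Set.ofList (c :: rest)).map K := List.mem_map_of_mem this
        rw [hvals] at this; simp at this
    rw [hnil]; simp [PySem.List.maxD, PySem.List.max?]
  · -- nonempty: maxD (v::t) id 0 = foldl max v t = foldl max 0 (v::t) since 1 ≤ v
    have hvmem : v ∈ (PySem.Set.ofList firsts).map K := by rw [hvals]; simp
    have hvpos : (0 : Int) ≤ v := by
      rcases List.mem_map.1 hvmem with ⟨c, hc, hkc⟩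
      have : c ∈ firsts := (PySem.Set.mem_ofList _ _).1 hc
      have h1 : 1 ≤ firsts.count c := List.one_le_count_iff.2 this
      have h2 := hkc
      simp only [hK] at h2
      omega
    have hD : PySem.List.maxD (v :: t) (fun v => v) 0 = (v :: t).foldl max 0 := by
      unfold PySem.List.maxD
      rw [PySem.List.max?_id_cons]
      simp [List.foldl_cons, max_eq_right hvpos]
    rw [hD]
    apply foldl_max_eq_of_memIff
    intro x
    constructor
    · intro hx
      rcases List.mem_map.1 hx with ⟨c, hc, hkc⟩
      rw [← hvals]
      exact List.mem_map.2 ⟨c, (PySem.Set.mem_ofList _ _).2 hc, hkc⟩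
    · intro hx
      rw [← hvals] at hx
      rcases List.mem_map.1 hx with ⟨c, hc, hkc⟩
      exact List.mem_map.2 ⟨c, (PySem.Set.mem_ofList _ _).1 hc, hkc⟩
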